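-- pv_equiv track=rewrite | github.com/zukahai/algorithm-basics-tutorial | Cô Giáo Thanh Vân/06_tìm_kiếm_nhị_phân/MuaBut.py | findPen
-- ===== SOURCE A (Python) =====
-- def findPen(n):
--     l = 1
--     r = n
--     kq = -1
--     while l <= r:
--         m = (l + r) // 2
--         s = m + (m // 5) * 2
--         if s >= n:
--             kq = m
--             r = m - 1
--         else:
--             l = m + 1
--     return kq
-- ===== SOURCE B (Python) =====
-- def findPen(n):
--     # Closed-form inversion of f(m) = m + (m//5)*2: with m = 5q+r (0<=r<5), f(m) = 7q+r.
--     if n < 1: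
--         return -1
--     q, r = divmod(n, 7)
--     return 5 * q + r if r <= 4 else 5 * (q + 1)
-- ===== Notes on version B (the rewrite author's own statement) =====
-- stated objective: faster
-- what changed: Replaced the binary search for the smallest m with m+(m//5)*2 >= n by a closed-form inversion: writing m = 5q+r gives f(m) = 7q+r, so m is computed directly from divmod(n, 7).
import Mathlib
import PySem

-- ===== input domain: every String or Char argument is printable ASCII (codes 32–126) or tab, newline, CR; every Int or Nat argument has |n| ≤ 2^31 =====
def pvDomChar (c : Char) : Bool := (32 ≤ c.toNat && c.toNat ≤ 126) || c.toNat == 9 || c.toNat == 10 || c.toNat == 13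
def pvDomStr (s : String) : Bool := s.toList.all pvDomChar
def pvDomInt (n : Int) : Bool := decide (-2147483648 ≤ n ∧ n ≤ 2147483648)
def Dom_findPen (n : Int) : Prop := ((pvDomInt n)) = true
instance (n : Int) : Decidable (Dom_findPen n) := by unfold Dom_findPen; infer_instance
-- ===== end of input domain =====

-- B replaces A's binary search by a closed-form inversion of m + (m//5)*2 (a direct formula instead of the search loop).

-- ===== PORT A =====
-- literal port of A's while loop; terminates because r - l shrinks
def findPenLoop (n l r kq : Int) : Int :=
  if _h : l ≤ r then
    let m := PySem.Int.floordiv (l + r) 2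
    let s := m + (PySem.Int.floordiv m 5) * 2
    if s ≥ n then findPenLoop n l (m - 1) m
    else findPenLoop n (m + 1) r kq
  else kq
termination_by (r - l + 1).toNat
decreasing_by
  · have := PySem.Int.floordiv_two_mid_bounds _h
    omega
  · have := PySem.Int.floordiv_two_mid_bounds _h
    omega

def findPen (n : Int) : Int := findPenLoop n 1 n (-1)

-- ===== PORT B =====
def findPen_alt (n : Int) : Int :=
  if n < 1 then -1
  else
    let q := PySem.Int.floordiv n 7
    let r := PySem.Int.mod n 7
    if r ≤ 4 then 5 * q + r else 5 * (q + 1)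

-- ===== PRECONDITION & SPEC =====
def Spec_findPen (n : Int) (out : Int) : Prop := out = findPen_alt n
instance (n : Int) (out : Int) : Decidable (Spec_findPen n out) := by unfold Spec_findPen; infer_instance

-- ===== CLAIM (what is proved, stated in full; the proofs are below) =====
def Claim_equal_findPen : Prop := ∀ (n : Int), Dom_findPen n → Spec_findPen n (findPen n)

-- ===== LEMMAS AND PROOFS =====

-- the scanned quantity f m = m + (m//5)*2
def pvF (m : Int) : Int := m + (PySem.Int.floordiv m 5) * 2

theorem pvF_eq (m : Int) : pvF m = m + (m / 5) * 2 := by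
  unfold pvF
  rw [PySem.Int.floordiv_eq_ediv_of_pos (by norm_num : (0:Int) < 5)]

-- the invariant-preserving loop lemma: if t is the least index with pvF t ≥ n,
-- then the loop started with l ≤ t ≤ r+1 (and kq already correct when t = r+1) returns t
theorem loop_eq_t (n t : Int) (htf : n ≤ pvF t) (hlt : ∀ m, m < t → pvF m < n) :
    ∀ l r kq, l ≤ t → t ≤ r + 1 → (t = r + 1 → kq = t) → findPenLoop n l r kq = t := by
  intro l r kq
  induction l, r, kq using findPenLoop.induct n with
  | case1 l r kq h m s hge ih =>
    intro h1 h2 h3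
    have hge' : PySem.Int.floordiv (l + r) 2 +
        PySem.Int.floordiv (PySem.Int.floordiv (l + r) 2) 5 * 2 ≥ n := hge
    rw [findPenLoop, dif_pos h, if_pos hge']
    have ht_le : t ≤ PySem.Int.floordiv (l + r) 2 := by
      by_contra hc
      push Not at hc
      have hfm : pvF (PySem.Int.floordiv (l + r) 2) < n := hlt _ hc
      unfold pvF at hfm
      omega
    apply ih
    · exact h1
    · show t ≤ PySem.Int.floordiv (l + r) 2 - 1 + 1
      omega
    · show t = PySem.Int.floordiv (l + r) 2 - 1 + 1 → PySem.Int.floordiv (l + r) 2 = t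
      omega
  | case2 l r kq h m s hge ih =>
    intro h1 h2 h3
    have hb := PySem.Int.floordiv_two_mid_bounds h
    have hge' : ¬ (PySem.Int.floordiv (l + r) 2 +
        PySem.Int.floordiv (PySem.Int.floordiv (l + r) 2) 5 * 2 ≥ n) := hge
    rw [findPenLoop, dif_pos h, if_neg hge']
    have hgt : PySem.Int.floordiv (l + r) 2 < t := by
      by_contra hc
      push Not at hc
      have h5 : (0:Int) < 5 := by norm_num
      have htf' : n ≤ t + PySem.Int.floordiv t 5 * 2 := htf
      have hm5 : PySem.Int.floordiv t 5 ≤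
          PySem.Int.floordiv (PySem.Int.floordiv (l + r) 2) 5 := by
        rw [PySem.Int.floordiv_eq_ediv_of_pos h5, PySem.Int.floordiv_eq_ediv_of_pos h5]
        omega
      omega
    apply ih
    · show PySem.Int.floordiv (l + r) 2 + 1 ≤ t
      omega
    · exact h2
    · exact h3
  | case3 l r kq h =>
    intro h1 h2 h3
    rw [findPenLoop, dif_neg h]
    omega

theorem findPen_spec_aux (n : Int) : findPen n = findPen_alt n := by
  unfold findPen findPen_alt
  by_cases hn : n < 1
  · simp only [hn, if_true]
    rw [findPenLoop]
    simp only [show ¬ ((1:Int) ≤ n) by omega, dite_false]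
  · simp only [hn, if_false]
    have h7 : (0:Int) < 7 := by norm_num
    rw [PySem.Int.floordiv_eq_ediv_of_pos h7, PySem.Int.mod_eq_emod_of_pos h7]
    set t : Int := if n % 7 ≤ 4 then 5 * (n / 7) + n % 7 else 5 * (n / 7 + 1) with ht
    have h1t : 1 ≤ t := by rw [ht]; split <;> omega
    have htn : t ≤ n := by rw [ht]; split <;> omega
    have htf : n ≤ pvF t := by
      rw [pvF_eq, ht]; split <;> omega
    have hlt : ∀ m, m < t → pvF m < n := by
      intro m hm
      rw [pvF_eq]
      rw [ht] at hm
      split at hm <;> omega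
    exact loop_eq_t n t htf hlt 1 n (-1) h1t (by omega) (by omega)

-- ===== VERDICT (by name: the statement is the Claim_ definition above) =====
theorem findPen_spec : Claim_equal_findPen := by
  intro n _
  unfold Spec_findPen
  exact findPen_spec_aux n
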